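-- pv_equiv track=rewrite | github.com/hyeinhyun/alg_prac | boj/1074.py | dq2
-- ===== SOURCE A (Python) =====
-- def dq2(N,r,c):
--
--     if N==1:
--         if r%2==0 and c%2==0:
--             return 0
--         elif r%2==0 and c%2==1:
--             return 1
--         elif r%2==1 and c%2==0:
--             return 2
--         else:
--             return 3
--     else:
--         n=N-1
--         m=2**n
--         if r//m==0 and c//m==0:#상대적 1에 위치
--             result= 0*(m*m)+dq2(n,r,c)
--
--         elif r//m==0 and c//m==1:#상대적 2에 위치
--
--             result= 1*(m*m)+dq2(n,r,c-m)
--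
--         elif r//m==1 and c//m==0:
--             result= 2*(m*m)+dq2(n,r-m,c)
--
--         else:
--
--             result= 3*(m*m)+dq2(n,r-m,c-m)
--
--     #combine
--     return result
-- ===== SOURCE B (Python) =====
-- def dq2(N, r, c):
--     # Iterative Morton/Z-order index: walk bit levels N-1..1 with an accumulator
--     # instead of recursing over quadrants.
--     result = 0
--     for i in range(N - 1, 0, -1):
--         m = 1 << i
--         qr, qc = r // m, c // m
--         if qr == 0 and qc == 0:
--             q = 0
--         elif qr == 0 and qc == 1:
--             q = 1
--             c -= m
--         elif qr == 1 and qc == 0: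
--             q = 2
--             r -= m
--         else:
--             q = 3
--             r -= m
--             c -= m
--         result = result * 4 + q
--     return result * 4 + 2 * (r % 2) + c % 2
-- ===== Notes on version B (the rewrite author's own statement) =====
-- stated objective: faster
-- what changed: Replaces A's quadrant recursion (q*(m*m) plus a recursive call per level, with a four-way if-chain base case) by a single iterative loop over bit levels threading one accumulator result = result*4 + q, with the base case collapsed to 2*(r%2)+c%2; the loop avoids per-level Python call overhead and the recursion-depth limit.
import Mathlib
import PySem

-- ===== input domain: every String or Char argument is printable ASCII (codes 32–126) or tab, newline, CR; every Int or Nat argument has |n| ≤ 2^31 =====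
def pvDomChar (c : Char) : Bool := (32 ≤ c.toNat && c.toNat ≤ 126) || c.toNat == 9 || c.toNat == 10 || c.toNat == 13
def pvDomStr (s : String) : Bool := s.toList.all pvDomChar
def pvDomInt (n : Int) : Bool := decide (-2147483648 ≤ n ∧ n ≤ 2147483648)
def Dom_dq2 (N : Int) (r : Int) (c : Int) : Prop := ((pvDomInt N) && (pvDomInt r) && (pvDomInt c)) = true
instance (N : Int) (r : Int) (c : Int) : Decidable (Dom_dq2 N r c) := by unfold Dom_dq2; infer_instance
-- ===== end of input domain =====

-- B replaces A's quadrant recursion by an iterative loop over bit levels with a single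
-- result accumulator (simpler decomposition); A = B is proved for all N ≥ 1 (for N ≤ 0 the
-- Python A recurses forever / raises, excluded by Pre_).


-- ===== PORT A =====
-- Literal port of A; the recursion on N is made total with fuel = N.toNat, which is
-- sufficient for every N ≥ 1 (inside Pre_).  '2 ** n' is ported as 2 ^ n.toNat, exact for
-- n ≥ 0 (for n < 0 Python produces a float, outside Pre_).
def dq2Fuel : Nat → Int → Int → Int → Int
  | 0, _, _, _ => 0
  | fuel+1, N, r, c =>
    if N = 1 then
      if PySem.Int.mod r 2 = 0 ∧ PySem.Int.mod c 2 = 0 then 0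
      else if PySem.Int.mod r 2 = 0 ∧ PySem.Int.mod c 2 = 1 then 1
      else if PySem.Int.mod r 2 = 1 ∧ PySem.Int.mod c 2 = 0 then 2
      else 3
    else
      let n := N - 1
      let m : Int := 2 ^ n.toNat
      if PySem.Int.floordiv r m = 0 ∧ PySem.Int.floordiv c m = 0 then
        0 * (m * m) + dq2Fuel fuel n r c
      else if PySem.Int.floordiv r m = 0 ∧ PySem.Int.floordiv c m = 1 then
        1 * (m * m) + dq2Fuel fuel n r (c - m)
      else if PySem.Int.floordiv r m = 1 ∧ PySem.Int.floordiv c m = 0 then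
        2 * (m * m) + dq2Fuel fuel n (r - m) c
      else
        3 * (m * m) + dq2Fuel fuel n (r - m) (c - m)

def dq2 (N : Int) (r : Int) (c : Int) : Int := dq2Fuel N.toNat N r c

-- ===== PORT B =====
-- one iteration of B's loop body; state is (r, c, result).  '1 << i' = 2 ^ i.toNat, exact
-- for the loop's i ≥ 1.
def bStep (st : Int × Int × Int) (i : Int) : Int × Int × Int :=
  let m : Int := 2 ^ i.toNat
  if PySem.Int.floordiv st.1 m = 0 ∧ PySem.Int.floordiv st.2.1 m = 0 then
    (st.1, st.2.1, st.2.2 * 4 + 0)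
  else if PySem.Int.floordiv st.1 m = 0 ∧ PySem.Int.floordiv st.2.1 m = 1 then
    (st.1, st.2.1 - m, st.2.2 * 4 + 1)
  else if PySem.Int.floordiv st.1 m = 1 ∧ PySem.Int.floordiv st.2.1 m = 0 then
    (st.1 - m, st.2.1, st.2.2 * 4 + 2)
  else
    (st.1 - m, st.2.1 - m, st.2.2 * 4 + 3)

def dq2_alt (N : Int) (r : Int) (c : Int) : Int :=
  let s := (PySem.List.pyRange (N - 1) 0 (-1)).foldl bStep (r, c, 0)
  s.2.2 * 4 + 2 * PySem.Int.mod s.1 2 + PySem.Int.mod s.2.1 2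

-- ===== PRECONDITION & SPEC =====
-- Pre_ excludes exactly N ≤ 0, where Python A recurses without a base case (RecursionError
-- or ZeroDivisionError); A returns normally for every N ≥ 1.
def Pre_dq2 (N : Int) (r : Int) (c : Int) : Prop := 1 ≤ N
instance (N : Int) (r : Int) (c : Int) : Decidable (Pre_dq2 N r c) := by unfold Pre_dq2; infer_instance
def pvWitness_dq2 : Int × Int × Int := (2, 1, 3)

def Spec_dq2 (N : Int) (r : Int) (c : Int) (out : Int) : Prop := out = dq2_alt N r c
instance (N : Int) (r : Int) (c : Int) (out : Int) : Decidable (Spec_dq2 N r c out) := by unfold Spec_dq2; infer_instance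

-- ===== CLAIM (what is proved, stated in full; the proofs are below) =====
def Claim_equal_dq2 : Prop := ∀ (N : Int) (r : Int) (c : Int), Dom_dq2 N r c → Pre_dq2 N r c → Spec_dq2 N r c (dq2 N r c)

-- ===== LEMMAS AND PROOFS =====

-- B's whole computation as a function of the remaining level list and the loop state.
def altG (l : List Int) (st : Int × Int × Int) : Int :=
  let s := l.foldl bStep st
  s.2.2 * 4 + 2 * PySem.Int.mod s.1 2 + PySem.Int.mod s.2.1 2

theorem dq2_alt_eq_altG (N r c : Int) :
    dq2_alt N r c = altG (PySem.List.pyRange (N - 1) 0 (-1)) (r, c, 0) := rfl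

theorem bStep_split (r c res i : Int) :
    bStep (r, c, res) i =
      ((bStep (r, c, 0) i).1, (bStep (r, c, 0) i).2.1, res * 4 + (bStep (r, c, 0) i).2.2) := by
  simp only [bStep]
  split_ifs <;> simp

theorem foldl_bStep_res (l : List Int) : ∀ (r c res : Int),
    l.foldl bStep (r, c, res) =
      ((l.foldl bStep (r, c, 0)).1, (l.foldl bStep (r, c, 0)).2.1,
        res * 4 ^ l.length + (l.foldl bStep (r, c, 0)).2.2) := by
  induction l with
  | nil => intro r c res; simp
  | cons i l ih =>
    intro r c res
    simp only [List.foldl_cons, List.length_cons]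
    rw [bStep_split r c res i, bStep_split r c 0 i]
    obtain ⟨r', c', q⟩ : Int × Int × Int := bStep (r, c, 0) i
    rw [ih r' c' (res * 4 + (0 * 4 + q)), ih r' c' (0 * 4 + q)]
    simp only [Prod.mk.injEq, true_and]
    ring

theorem altG_shift (l : List Int) (r c res : Int) :
    altG l (r, c, res) = res * 4 ^ (l.length + 1) + altG l (r, c, 0) := by
  simp only [altG, foldl_bStep_res l r c res]
  ring

theorem length_pyRange_countdown (k : Nat) :
    (PySem.List.pyRange (k : Int) 0 (-1)).length = k := by
  rw [PySem.List.length_pyRange_neg_one]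
  omega

theorem dq2Fuel_succ_ne (fuel : Nat) (N r c : Int) (h : ¬ N = 1) :
    dq2Fuel (fuel + 1) N r c =
      (if PySem.Int.floordiv r (2 ^ (N - 1).toNat) = 0 ∧
          PySem.Int.floordiv c (2 ^ (N - 1).toNat) = 0 then
        0 * ((2 : Int) ^ (N - 1).toNat * 2 ^ (N - 1).toNat) + dq2Fuel fuel (N - 1) r c
      else if PySem.Int.floordiv r (2 ^ (N - 1).toNat) = 0 ∧
          PySem.Int.floordiv c (2 ^ (N - 1).toNat) = 1 then
        1 * ((2 : Int) ^ (N - 1).toNat * 2 ^ (N - 1).toNat) +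
          dq2Fuel fuel (N - 1) r (c - 2 ^ (N - 1).toNat)
      else if PySem.Int.floordiv r (2 ^ (N - 1).toNat) = 1 ∧
          PySem.Int.floordiv c (2 ^ (N - 1).toNat) = 0 then
        2 * ((2 : Int) ^ (N - 1).toNat * 2 ^ (N - 1).toNat) +
          dq2Fuel fuel (N - 1) (r - 2 ^ (N - 1).toNat) c
      else
        3 * ((2 : Int) ^ (N - 1).toNat * 2 ^ (N - 1).toNat) +
          dq2Fuel fuel (N - 1) (r - 2 ^ (N - 1).toNat) (c - 2 ^ (N - 1).toNat)) := by
  conv_lhs => rw [dq2Fuel]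
  rw [if_neg h]

theorem dq2Fuel_one (fuel : Nat) (r c : Int) :
    dq2Fuel (fuel + 1) 1 r c =
      (if PySem.Int.mod r 2 = 0 ∧ PySem.Int.mod c 2 = 0 then 0
      else if PySem.Int.mod r 2 = 0 ∧ PySem.Int.mod c 2 = 1 then 1
      else if PySem.Int.mod r 2 = 1 ∧ PySem.Int.mod c 2 = 0 then 2
      else 3) := by
  conv_lhs => rw [dq2Fuel]
  rw [if_pos rfl]

theorem dq2_main (k : Nat) : ∀ (r c : Int),
    dq2Fuel (k + 1) ((k : Int) + 1) r c = altG (PySem.List.pyRange (k : Int) 0 (-1)) (r, c, 0) := by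
  induction k with
  | zero =>
    intro r c
    rw [PySem.List.pyRange_neg_one_eq_nil (by norm_num)]
    simp only [Nat.cast_zero, zero_add, dq2Fuel_one, altG, List.foldl_nil]
    rcases PySem.Int.mod_two_eq r with hr | hr <;> rcases PySem.Int.mod_two_eq c with hc | hc <;>
      · simp only [hr, hc]
        norm_num
  | succ k ih =>
    intro r c
    have htn : ((k : Int) + 1).toNat = k + 1 := by omega
    have hcons := PySem.List.pyRange_neg_one_cons (show (0 : Int) < (k : Int) + 1 by omega)
    rw [show ((k : Int) + 1 - 1) = (k : Int) from by ring] at hcons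
    have hlen := length_pyRange_countdown k
    have hmm : ((4 : Int) ^ (k + 1)) = ((2 : Int) ^ (k + 1)) * 2 ^ (k + 1) := by
      rw [← mul_pow]; norm_num
    push_cast
    rw [dq2Fuel_succ_ne _ _ _ _ (by omega :  ¬ ((k : Int) + 1 + 1) = 1)]
    rw [show ((k : Int) + 1 + 1 - 1) = (k : Int) + 1 from by ring, htn, hcons]
    simp only [altG, List.foldl_cons, bStep, htn]
    split_ifs with h1 h2 h3 <;>
      · show _ = altG (PySem.List.pyRange (k : Int) 0 (-1)) (_, _, _)
        rw [altG_shift, hlen, ih, hmm]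
        ring

-- ===== VERDICT (by name: the statement is the Claim_ definition above) =====
theorem dq2_spec : Claim_equal_dq2 := by
  intro N r c _ hpre
  unfold Spec_dq2
  obtain ⟨k, hk⟩ : ∃ k : Nat, N = (k : Int) + 1 := ⟨(N - 1).toNat, by unfold Pre_dq2 at hpre; omega⟩
  subst hk
  have ht : ((k : Int) + 1).toNat = k + 1 := by omega
  have hn : ((k : Int) + 1 - 1) = (k : Int) := by ring
  rw [dq2_alt_eq_altG, hn, dq2, ht]
  exact dq2_main k r c
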